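-- pv_equiv track=rewrite | github.com/Jonny1003/capstone-18500-eeg | modeling/featurize.py | get_maxes_tossed
-- ===== SOURCE A (Python) =====
-- def get_maxes_tossed(columnName, df, threshold):
--     prev = None
--     prevPrev = None
--     data = []
--     for v in df[columnName]:
--         if prev == None or prevPrev == None:
--             pass
--         elif prev < prevPrev and prev < v:
--             data.append(prev)
--         elif prev > prevPrev and prev > v:
--             data.append(prev)
--         prevPrev = prev
--         prev = v
--     out = []
--     for i,curr in enumerate(data):
--         if i > 0 and i < len(data)-1:
--             prev = data[i-1]
--             next = data[i+1]
--             if curr > prev and curr > next: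
--                 # peak
--                 if not (abs(curr-prev) < threshold and abs(curr-next) < threshold):
--                     out.append(curr)
--     return out
-- ===== SOURCE B (Python) =====
-- def get_maxes_tossed(columnName, df, threshold):
--     # Single fused pass: detect strict local extrema on the fly and test each
--     # completed (e1, e2, e3) window of consecutive extrema, emitting the middle
--     # one when it is a peak that clears the threshold test.
--     out = []
--     prevPrev = None
--     prev = None
--     w1 = None  # second-to-last detected extremum
--     w2 = None  # last detected extremum
--     for v in df[columnName]:
--         e = None
--         if prevPrev is not None and prev is not None:
--             if (prev < prevPrev and prev < v) or (prev > prevPrev and prev > v):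
--                 e = prev
--         prevPrev, prev = prev, v
--         if e is not None:
--             if w1 is not None and w2 is not None:
--                 if w2 > w1 and w2 > e and not (abs(w2 - w1) < threshold and abs(w2 - e) < threshold):
--                     out.append(w2)
--             w1, w2 = w2, e
--     return out
-- ===== Notes on version B (the rewrite author's own statement) =====
-- stated objective: alternative
-- what changed: B fuses A's two passes into one streaming loop: each strict local extremum is detected on the fly and pushed through a sliding window of the last three extrema, emitting the middle element of each full window, so the intermediate extrema list is never built.
import Mathlib
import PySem

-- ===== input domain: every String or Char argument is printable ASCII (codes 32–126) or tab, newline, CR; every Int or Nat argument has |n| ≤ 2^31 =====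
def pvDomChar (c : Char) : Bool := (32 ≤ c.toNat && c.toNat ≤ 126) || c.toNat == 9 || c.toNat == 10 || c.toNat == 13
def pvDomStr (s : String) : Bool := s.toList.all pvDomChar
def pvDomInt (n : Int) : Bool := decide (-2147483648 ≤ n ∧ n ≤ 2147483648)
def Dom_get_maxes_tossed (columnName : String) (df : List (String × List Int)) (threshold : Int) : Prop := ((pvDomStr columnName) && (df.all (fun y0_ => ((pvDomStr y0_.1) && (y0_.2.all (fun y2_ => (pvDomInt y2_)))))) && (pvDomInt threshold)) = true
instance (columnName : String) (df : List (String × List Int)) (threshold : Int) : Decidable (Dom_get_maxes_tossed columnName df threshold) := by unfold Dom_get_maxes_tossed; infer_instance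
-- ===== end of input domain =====

-- B fuses A's two passes into one: extrema are detected on the fly and fed into a
-- sliding three-extrema window, so the intermediate list is never built (objective: simpler/alternative, same O(n)).

-- ===== PORT A =====
-- A-side helpers: the two loop passes of A, transliterated
def pvAPass1 (col : List Int) : List Int :=
  (col.foldl (fun (st : Option Int × Option Int × List Int) v =>
      let prev := st.1
      let prevPrev := st.2.1
      let data := st.2.2
      let data :=
        match prev, prevPrev with
        | some p, some pp =>
          if p < pp ∧ p < v then data ++ [p]
          else if p > pp ∧ p > v then data ++ [p]
          else data
        | _, _ => data
      (some v, prev, data)) (none, none, [])).2.2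

def pvAPass2 (threshold : Int) (data : List Int) : List Int :=
  (data.foldl (fun (st : List Int × Nat) curr =>
      let out := st.1
      let i := st.2
      let out :=
        if 0 < i ∧ (i : Int) < (data.length : Int) - 1 then
          -- indices i-1, i+1 are always in range here, so the default is never used
          let p := PySem.List.pyGetD data ((i : Int) - 1) 0
          let nx := PySem.List.pyGetD data ((i : Int) + 1) 0
          if curr > p ∧ curr > nx then
            if ¬ (|curr - p| < threshold ∧ |curr - nx| < threshold) then out ++ [curr] else out
          else out
        else out
      (out, i + 1)) ([], 0)).1

-- Two passes: build the extrema list `data`, then scan its interior by index.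
def get_maxes_tossed (columnName : String) (df : List (String × List Int)) (threshold : Int) : List Int :=
  -- KeyError (missing column) is excluded by Pre_
  pvAPass2 threshold (pvAPass1 (((PySem.Dict.mk df).get? columnName).getD []))

-- ===== PORT B =====
-- B-side helper: the single fused loop; state = ((prevPrev, prev), (w1, w2), out).
def pvBLoop (threshold : Int) (col : List Int) : List Int :=
  (col.foldl (fun (st : (Option Int × Option Int) × (Option Int × Option Int) × List Int) v =>
      let e : Option Int :=
        match st.1.1, st.1.2 with
        | some pp, some p => if (p < pp ∧ p < v) ∨ (p > pp ∧ p > v) then some p else none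
        | _, _ => none
      let pp_p := (st.1.2, some v)
      match e with
      | none => (pp_p, st.2.1, st.2.2)
      | some e =>
        let out :=
          match st.2.1.1, st.2.1.2 with
          | some a, some b =>
            if b > a ∧ b > e ∧ ¬ (|b - a| < threshold ∧ |b - e| < threshold) then st.2.2 ++ [b]
            else st.2.2
          | _, _ => st.2.2
        (pp_p, (st.2.1.2, some e), out)) ((none, none), (none, none), [])).2.2

def get_maxes_tossed_alt (columnName : String) (df : List (String × List Int)) (threshold : Int) : List Int :=
  -- KeyError (missing column) is excluded by Pre_
  pvBLoop threshold (((PySem.Dict.mk df).get? columnName).getD [])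

-- ===== PRECONDITION & SPEC =====
-- Pre_ excludes exactly the inputs where Python's df[columnName] raises KeyError (column absent).
def Pre_get_maxes_tossed (columnName : String) (df : List (String × List Int)) (threshold : Int) : Prop :=
  ((PySem.Dict.mk df).get? columnName).isSome = true
instance (columnName : String) (df : List (String × List Int)) (threshold : Int) : Decidable (Pre_get_maxes_tossed columnName df threshold) := by unfold Pre_get_maxes_tossed; infer_instance
def pvWitness_get_maxes_tossed : String × (List (String × List Int)) × Int := ("c", [("c", [1, 3, 0, 5, 1])], 1)

def Spec_get_maxes_tossed (columnName : String) (df : List (String × List Int)) (threshold : Int) (out : List Int) : Prop := out = get_maxes_tossed_alt columnName df threshold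
instance (columnName : String) (df : List (String × List Int)) (threshold : Int) (out : List Int) : Decidable (Spec_get_maxes_tossed columnName df threshold out) := by unfold Spec_get_maxes_tossed; infer_instance

-- ===== CLAIM (what is proved, stated in full; the proofs are below) =====
def Claim_equal_get_maxes_tossed : Prop := ∀ (columnName : String) (df : List (String × List Int)) (threshold : Int), Dom_get_maxes_tossed columnName df threshold → Pre_get_maxes_tossed columnName df threshold → Spec_get_maxes_tossed columnName df threshold (get_maxes_tossed columnName df threshold)

-- ===== LEMMAS AND PROOFS =====

-- the extremum (if any) detected at element v given (prev, prevPrev)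
def pvExt (p pp : Option Int) (v : Int) : Option Int :=
  match p, pp with
  | some p, some pp => if (p < pp ∧ p < v) ∨ (p > pp ∧ p > v) then some p else none
  | _, _ => none

-- the extrema stream of a column starting from state (prev, prevPrev)
def pvExts : List Int → Option Int → Option Int → List Int
  | [], _, _ => []
  | v :: vs, p, pp => (pvExt p pp v).toList ++ pvExts vs (some v) p

-- middle-of-triple emission
def pvMid (t a b c : Int) : List Int :=
  if b > a ∧ b > c ∧ ¬ (|b - a| < t ∧ |b - c| < t) then [b] else []

-- scan of consecutive triples
def pvTriples (t : Int) : List Int → List Int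
  | a :: b :: c :: r => pvMid t a b c ++ pvTriples t (b :: c :: r)
  | _ => []

-- (1) A's first pass accumulates exactly pvExts
theorem passA1_exts_aux (col : List Int) : ∀ (p pp : Option Int) (data : List Int),
    (col.foldl (fun (st : Option Int × Option Int × List Int) v =>
      let prev := st.1
      let prevPrev := st.2.1
      let data := st.2.2
      let data :=
        match prev, prevPrev with
        | some p, some pp =>
          if p < pp ∧ p < v then data ++ [p]
          else if p > pp ∧ p > v then data ++ [p]
          else data
        | _, _ => data
      (some v, prev, data)) (p, pp, data)).2.2 = data ++ pvExts col p pp := by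
  induction col with
  | nil => intro p pp data; simp [pvExts]
  | cons v vs ih =>
    intro p pp data
    have hstep : (match p, pp with
        | some p, some pp =>
          if p < pp ∧ p < v then data ++ [p]
          else if p > pp ∧ p > v then data ++ [p]
          else data
        | _, _ => data) = data ++ (pvExt p pp v).toList := by
      cases p <;> cases pp <;> simp [pvExt] <;> split_ifs <;> simp_all <;> omega
    simp only [List.foldl_cons, ih, pvExts]
    rw [hstep, List.append_assoc]

theorem passA1_exts (col : List Int) : pvAPass1 col = pvExts col none none := by
  unfold pvAPass1
  rw [passA1_exts_aux col none none []]
  simp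

-- (2) B's single pass equals feeding pvExts into the window fold
theorem passB_window_aux (t : Int) (col : List Int) : ∀ (pp p w1 w2 : Option Int) (out : List Int),
    (col.foldl (fun (st : (Option Int × Option Int) × (Option Int × Option Int) × List Int) v =>
      let e : Option Int :=
        match st.1.1, st.1.2 with
        | some pp, some p => if (p < pp ∧ p < v) ∨ (p > pp ∧ p > v) then some p else none
        | _, _ => none
      let pp_p := (st.1.2, some v)
      match e with
      | none => (pp_p, st.2.1, st.2.2)
      | some e =>
        let out :=
          match st.2.1.1, st.2.1.2 with
          | some a, some b =>
            if b > a ∧ b > e ∧ ¬ (|b - a| < t ∧ |b - e| < t) then st.2.2 ++ [b]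
            else st.2.2
          | _, _ => st.2.2
        (pp_p, (st.2.1.2, some e), out)) ((pp, p), (w1, w2), out)).2.2
    = ((pvExts col p pp).foldl (fun (st : (Option Int × Option Int) × List Int) e =>
        ((st.1.2, some e),
          match st.1.1, st.1.2 with
          | some a, some b => st.2 ++ pvMid t a b e
          | _, _ => st.2)) ((w1, w2), out)).2 := by
  induction col with
  | nil => intro pp p w1 w2 out; simp [pvExts]
  | cons v vs ih =>
    intro pp p w1 w2 out
    simp only [List.foldl_cons, pvExts]
    cases pp with
    | none =>
      cases p with
      | none => simpa [pvExt] using ih none (some v) w1 w2 out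
      | some a => simpa [pvExt] using ih (some a) (some v) w1 w2 out
    | some b =>
      cases p with
      | none => simpa [pvExt] using ih none (some v) w1 w2 out
      | some a =>
        by_cases h : (a < b ∧ a < v) ∨ (a > b ∧ a > v)
        · have houts : (match w1, w2 with
              | some x, some y =>
                if y > x ∧ y > a ∧ ¬ (|y - x| < t ∧ |y - a| < t) then out ++ [y] else out
              | _, _ => out)
            = ((fun (st : (Option Int × Option Int) × List Int) e =>
                ((st.1.2, some e),
                  match st.1.1, st.1.2 with
                  | some x, some y => st.2 ++ pvMid t x y e
                  | _, _ => st.2)) ((w1, w2), out) a).2 := by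
            cases w1 <;> cases w2 <;> simp [pvMid] <;> split_ifs <;> simp
          simp only [pvExt, if_pos h, Option.toList, List.cons_append, List.nil_append,
            List.foldl_cons]
          rw [ih (some a) (some v) w2 (some a) _]
          rw [houts]
        · simp only [pvExt, if_neg h, Option.toList, List.nil_append]
          simpa [h] using ih (some a) (some v) w1 w2 out

-- (3) the window fold from a full window computes pvTriples
theorem window_triples (t : Int) (es : List Int) : ∀ (a b : Int) (out : List Int),
    ((es.foldl (fun (st : (Option Int × Option Int) × List Int) e =>
        ((st.1.2, some e),
          match st.1.1, st.1.2 with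
          | some a, some b => st.2 ++ pvMid t a b e
          | _, _ => st.2)) ((some a, some b), out)).2)
    = out ++ pvTriples t (a :: b :: es) := by
  induction es with
  | nil => intro a b out; simp [pvTriples]
  | cons e r ih =>
    intro a b out
    simp only [List.foldl_cons]
    rw [ih, pvTriples, List.append_assoc]

-- (3') … and from the empty window too
theorem window_triples_start (t : Int) (es : List Int) (out : List Int) :
    ((es.foldl (fun (st : (Option Int × Option Int) × List Int) e =>
        ((st.1.2, some e),
          match st.1.1, st.1.2 with
          | some a, some b => st.2 ++ pvMid t a b e
          | _, _ => st.2)) ((none, none), out)).2)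
    = out ++ pvTriples t es := by
  match es with
  | [] => simp [pvTriples]
  | [e] => simp [pvTriples]
  | a :: b :: r =>
    simp only [List.foldl_cons]
    rw [window_triples t r a b out]

theorem passB_triples (t : Int) (col : List Int) : pvBLoop t col = pvTriples t (pvExts col none none) := by
  unfold pvBLoop
  rw [passB_window_aux t col none none none none []]
  rw [window_triples_start]
  simp

-- (4) A's second (indexed) pass equals pvTriples
theorem pvMid_if (t px c d : Int) (out : List Int) :
    (if c > px ∧ c > d then
        if ¬ (|c - px| < t ∧ |c - d| < t) then out ++ [c] else out
      else out) = out ++ pvMid t px c d := by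
  unfold pvMid
  split_ifs <;> simp_all

set_option maxHeartbeats 1000000 in
theorem passA2_aux (t : Int) (data : List Int) (l : List Int) : ∀ (px : Int) (i : Nat) (out : List Int),
    1 ≤ i → data.drop (i - 1) = px :: l →
    (l.foldl (fun (st : List Int × Nat) curr =>
      let out := st.1
      let i := st.2
      let out :=
        if 0 < i ∧ (i : Int) < (data.length : Int) - 1 then
          let p := PySem.List.pyGetD data ((i : Int) - 1) 0
          let nx := PySem.List.pyGetD data ((i : Int) + 1) 0
          if curr > p ∧ curr > nx then
            if ¬ (|curr - p| < t ∧ |curr - nx| < t) then out ++ [curr] else out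
          else out
        else out
      (out, i + 1)) (out, i)).1 = out ++ pvTriples t (px :: l) := by
  induction l with
  | nil =>
    intro px i out hi hdrop
    simp [pvTriples]
  | cons c l' ih =>
    intro px i out hi hdrop
    have hdl : (data.drop (i - 1)).length = data.length - (i - 1) := List.length_drop
    rw [hdrop] at hdl
    have hdropi : data.drop i = c :: l' := by
      have h : data.drop (i - 1 + 1) = (data.drop (i - 1)).drop 1 := by
        rw [List.drop_drop]
      have h2 : i - 1 + 1 = i := by omega
      rw [h2] at h
      rw [h, hdrop]
      rfl
    simp only [List.foldl_cons]
    match l' with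
    | [] =>
      have hcond : ¬ (0 < i ∧ (i : Int) < (data.length : Int) - 1) := by
        simp only [List.length_cons, List.length_nil] at hdl
        push_neg
        intro _
        omega
      rw [if_neg hcond]
      simp [pvTriples]
    | d :: l'' =>
      have hcond : 0 < i ∧ (i : Int) < (data.length : Int) - 1 := by
        simp only [List.length_cons] at hdl
        exact ⟨hi, by omega⟩
      rw [if_pos hcond]
      have hg1 : PySem.List.pyGetD data ((i : Int) - 1) 0 = px := by
        have hc : (i : Int) - 1 = ((i - 1 : Nat) : Int) := by omega
        rw [hc, PySem.List.pyGetD_natCast]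
        have hh : data[i - 1]? = some px := by
          rw [← List.head?_drop, hdrop]
          rfl
        simp [List.getD, hh]
      have hg2 : PySem.List.pyGetD data ((i : Int) + 1) 0 = d := by
        have hc : (i : Int) + 1 = ((i + 1 : Nat) : Int) := by omega
        rw [hc, PySem.List.pyGetD_natCast]
        have hd2 : data.drop (i + 1) = d :: l'' := by
          have h : data.drop (i + 1) = (data.drop i).drop 1 := by
            rw [List.drop_drop]
          rw [h, hdropi]
          rfl
        have hh : data[i + 1]? = some d := by
          rw [← List.head?_drop, hd2]
          rfl
        simp [List.getD, hh]
      rw [hg1, hg2]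
      rw [pvMid_if]
      have hdrop' : data.drop ((i + 1) - 1) = c :: d :: l'' := by
        simpa using hdropi
      rw [ih c (i + 1) _ (by omega) hdrop']
      rw [pvTriples, List.append_assoc]

theorem passA2_triples (t : Int) (data : List Int) : pvAPass2 t data = pvTriples t data := by
  unfold pvAPass2
  match data with
  | [] => rfl
  | a :: rest =>
    simp only [List.foldl_cons]
    rw [if_neg (by simp)]
    rw [passA2_aux t (a :: rest) rest a 1 [] le_rfl (by simp)]
    simp

-- ===== VERDICT (by name: the statement is the Claim_ definition above) =====
theorem get_maxes_tossed_spec : Claim_equal_get_maxes_tossed := by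
  intro columnName df threshold _ _
  unfold Spec_get_maxes_tossed get_maxes_tossed get_maxes_tossed_alt
  rw [passA1_exts, passA2_triples, passB_triples]
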